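-- pv_equiv track=rewrite | github.com/daniel-reich/turbo-robot | 2NPjN7DDvyi6f5CHF_22.py | age_difference
-- ===== SOURCE A (Python) =====
-- def age_difference(f_age, s_age):
--   if (f_age - s_age) > 2*s_age:
--     #looks for next age father will be 2x older
--     years = 0
--     while f_age > 2*s_age:
--       f_age += 1
--       s_age += 1
--       years += 1
--   else:
--     #looks for last time father was 2x older
--     years = 0
--     while f_age < 2*s_age:
--       f_age -= 1
--       s_age -= 1
--       years += 1
--
--   return years
-- ===== SOURCE B (Python) =====
-- def age_difference(f_age, s_age):
--     # Each loop adds 1 per year until f_age reaches 2*s_age; the gap shrinks/grows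
--     # by 1 per iteration, so the count is the (clamped) gap in closed form.
--     if f_age - s_age > 2 * s_age:
--         return max(f_age - 2 * s_age, 0)
--     else:
--         return max(2 * s_age - f_age, 0)
-- ===== Notes on version B (the rewrite author's own statement) =====
-- stated objective: faster
-- what changed: Replaces both counting while-loops with the closed-form clamped gap max(f_age-2*s_age,0) / max(2*s_age-f_age,0), keeping A's branch test.
import Mathlib
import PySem

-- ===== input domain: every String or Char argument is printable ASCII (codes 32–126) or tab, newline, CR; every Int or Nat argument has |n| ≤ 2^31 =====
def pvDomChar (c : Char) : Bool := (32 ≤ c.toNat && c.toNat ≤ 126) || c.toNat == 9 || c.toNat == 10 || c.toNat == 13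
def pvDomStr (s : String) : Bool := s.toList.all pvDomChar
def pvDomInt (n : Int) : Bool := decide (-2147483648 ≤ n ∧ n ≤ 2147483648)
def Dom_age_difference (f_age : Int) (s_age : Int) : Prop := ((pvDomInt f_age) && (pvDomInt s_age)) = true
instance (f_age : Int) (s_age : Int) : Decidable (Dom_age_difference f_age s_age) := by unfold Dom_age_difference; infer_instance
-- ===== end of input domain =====

-- B replaces A's two counting loops with closed-form clamped gaps (O(1) vs O(answer)), same branch test.

-- ===== PORT A =====
-- the 'while f_age > 2*s_age' loop: increments f_age, s_age, years each pass
def ageDiffLoopUp (f_age s_age years : Int) : Int :=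
  if f_age > 2 * s_age then ageDiffLoopUp (f_age + 1) (s_age + 1) (years + 1) else years
termination_by (f_age - 2 * s_age).toNat
decreasing_by omega

-- the 'while f_age < 2*s_age' loop: decrements f_age, s_age, increments years each pass
def ageDiffLoopDown (f_age s_age years : Int) : Int :=
  if f_age < 2 * s_age then ageDiffLoopDown (f_age - 1) (s_age - 1) (years + 1) else years
termination_by (2 * s_age - f_age).toNat
decreasing_by omega

def age_difference (f_age : Int) (s_age : Int) : Int :=
  if f_age - s_age > 2 * s_age then ageDiffLoopUp f_age s_age 0
  else ageDiffLoopDown f_age s_age 0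

-- ===== PORT B =====
def age_difference_alt (f_age : Int) (s_age : Int) : Int :=
  if f_age - s_age > 2 * s_age then max (f_age - 2 * s_age) 0
  else max (2 * s_age - f_age) 0

-- ===== PRECONDITION & SPEC =====
def Spec_age_difference (f_age : Int) (s_age : Int) (out : Int) : Prop :=
  out = age_difference_alt f_age s_age
instance (f_age : Int) (s_age : Int) (out : Int) : Decidable (Spec_age_difference f_age s_age out) := by
  unfold Spec_age_difference; infer_instance

-- ===== CLAIM =====
def Claim_equal_age_difference : Prop := ∀ (f_age : Int) (s_age : Int), Dom_age_difference f_age s_age → Spec_age_difference f_age s_age (age_difference f_age s_age)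

-- ===== LEMMAS AND PROOFS =====
theorem ageDiffLoopUp_eq (f_age s_age years : Int) :
    ageDiffLoopUp f_age s_age years = years + max (f_age - 2 * s_age) 0 := by
  fun_induction ageDiffLoopUp f_age s_age years with
  | case1 f s y h ih => rw [ih]; omega
  | case2 f s y h => omega

theorem ageDiffLoopDown_eq (f_age s_age years : Int) :
    ageDiffLoopDown f_age s_age years = years + max (2 * s_age - f_age) 0 := by
  fun_induction ageDiffLoopDown f_age s_age years with
  | case1 f s y h ih => rw [ih]; omega
  | case2 f s y h => omega

-- ===== VERDICT =====
theorem age_difference_spec : Claim_equal_age_difference := by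
  intro f s _
  unfold Spec_age_difference age_difference age_difference_alt
  split <;> simp [ageDiffLoopUp_eq, ageDiffLoopDown_eq]
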